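-- pv_equiv track=rewrite | github.com/Fabiett/CorsoPreparazioneTestCyberChallenge | lezione_03_02/2023-selection.py | calculate_max_global_score
-- ===== SOURCE A (Python) =====
-- from collections import defaultdict
--
-- def calculate_max_global_score(N, M, S, required_skills, candidates):
--     skill_to_candidates = defaultdict(list)
--     # Riempi il dizionario con i candidati valutati in base alle loro competenze
--     for candidate_id, skills in candidates.items():
--         for skill_name, skill_score in skills:
--             skill_to_candidates[skill_name].append(skill_score)
--     # Ordina i candidati per ogni skill in ordine decrescente di punteggi
--     for skill in skill_to_candidates:
--         skill_to_candidates[skill].sort(reverse=True)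
--     # Assegna i candidati migliori disponibili alle rispettive skills necessarie
--     global_score = 0
--     for skill_name in required_skills:
--         if skill_to_candidates[skill_name]:
--             # Se c'è un candidato disponibile con la skill necessaria, aggiungi il suo punteggio globale
--             global_score += skill_to_candidates[skill_name].pop(0)
--     return global_score
-- ===== SOURCE B (Python) =====
-- from collections import Counter
--
-- def calculate_max_global_score(N, M, S, required_skills, candidates):
--     # Group all offered scores per skill (no per-demand mutation needed).
--     skill_to_scores = {}
--     for skills in candidates.values():
--         for skill_name, skill_score in skills:
--             skill_to_scores.setdefault(skill_name, []).append(skill_score)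
--     # Aggregate the demand first, then take the top-cnt scores per distinct skill.
--     total = 0
--     for skill, cnt in Counter(required_skills).items():
--         top = sorted(skill_to_scores.get(skill, []), reverse=True)[:cnt]
--         total += sum(top)
--     return total
-- ===== Notes on version B (the rewrite author's own statement) =====
-- stated objective: alternative
-- what changed: Instead of popping the best remaining score once per occurrence of each required skill from a mutable per-skill list, B aggregates the demand with Counter(required_skills) and loops over the distinct (skill, cnt) pairs, summing the top cnt scores of that skill's list in one slice; no dict mutation or per-demand pop remains.
import Mathlib
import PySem

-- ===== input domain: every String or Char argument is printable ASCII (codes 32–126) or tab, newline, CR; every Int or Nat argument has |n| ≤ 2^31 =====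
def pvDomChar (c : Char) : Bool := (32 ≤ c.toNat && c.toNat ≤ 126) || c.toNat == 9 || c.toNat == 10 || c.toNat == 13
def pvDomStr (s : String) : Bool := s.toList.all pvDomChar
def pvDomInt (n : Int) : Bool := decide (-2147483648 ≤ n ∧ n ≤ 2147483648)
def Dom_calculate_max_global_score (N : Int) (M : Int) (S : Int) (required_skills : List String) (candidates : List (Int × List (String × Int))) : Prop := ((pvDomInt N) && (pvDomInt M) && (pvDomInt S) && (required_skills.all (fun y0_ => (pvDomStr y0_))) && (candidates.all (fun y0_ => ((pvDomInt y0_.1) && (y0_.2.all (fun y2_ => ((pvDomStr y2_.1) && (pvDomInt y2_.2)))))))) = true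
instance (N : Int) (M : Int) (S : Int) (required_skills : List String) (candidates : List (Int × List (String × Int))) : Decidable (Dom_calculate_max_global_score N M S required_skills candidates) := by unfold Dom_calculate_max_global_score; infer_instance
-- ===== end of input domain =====

-- B replaces A's per-demand pop loop by a Counter over the required skills and one top-cnt slice
-- per DISTINCT skill (objective: alternative decomposition, no mutable per-skill lists).

-- ===== PORT A =====
-- literal port of A: build skill→scores via defaultdict append over candidates.items(),
-- sort each skill's list descending in place, then pop the front once per required skill.
def calculate_max_global_score (N : Int) (M : Int) (S : Int) (required_skills : List String) (candidates : List (Int × List (String × Int))) : Int :=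
  let cdict : PySem.Dict Int (List (String × Int)) := PySem.Dict.ofList candidates
  let stc0 : PySem.Dict String (List Int) :=
    cdict.items.foldl
      (fun d p => p.2.foldl (fun d2 q => d2.modify q.1 [] (fun l => l ++ [q.2])) d)
      PySem.Dict.empty
  let stc : PySem.Dict String (List Int) :=
    stc0.keys.foldl
      (fun d sk => d.insert sk (PySem.List.sorted (d.getD sk []) (fun x => x) true)) stc0
  let st := required_skills.foldl
      (fun (st : PySem.Dict String (List Int) × Int) sname =>
        match st.1.getD sname [] with
        | [] => st
        | h :: t => (st.1.insert sname t, st.2 + h))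
      (stc, 0)
  st.2

-- ===== PORT B =====
-- literal port of B: group scores per skill via setdefault-append over candidates.values(),
-- then fold over Counter(required_skills).items(), adding the sum of the top-cnt slice.
def calculate_max_global_score_alt (N : Int) (M : Int) (S : Int) (required_skills : List String) (candidates : List (Int × List (String × Int))) : Int :=
  let sts : PySem.Dict String (List Int) :=
    (PySem.Dict.ofList candidates).values.foldl
      (fun d skills => skills.foldl (fun d2 q => d2.modify q.1 [] (fun l => l ++ [q.2])) d)
      PySem.Dict.empty
  let demand : PySem.Dict String Int :=
    required_skills.foldl (fun c s => c.insert s (c.getD s 0 + 1)) PySem.Dict.empty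
  demand.items.foldl
    (fun tot p =>
      tot + (PySem.List.slice (PySem.List.sorted (sts.getD p.1 []) (fun x => x) true) none (some p.2)).sum)
    0

-- ===== PRECONDITION & SPEC =====
def Spec_calculate_max_global_score (N : Int) (M : Int) (S : Int) (required_skills : List String) (candidates : List (Int × List (String × Int))) (out : Int) : Prop := out = calculate_max_global_score_alt N M S required_skills candidates
instance (N : Int) (M : Int) (S : Int) (required_skills : List String) (candidates : List (Int × List (String × Int))) (out : Int) : Decidable (Spec_calculate_max_global_score N M S required_skills candidates out) := by unfold Spec_calculate_max_global_score; infer_instance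

-- ===== CLAIM (what is proved, stated in full; the proofs are below) =====
def Claim_equal_calculate_max_global_score : Prop := ∀ (N : Int) (M : Int) (S : Int) (required_skills : List String) (candidates : List (Int × List (String × Int))), Dom_calculate_max_global_score N M S required_skills candidates → Spec_calculate_max_global_score N M S required_skills candidates (calculate_max_global_score N M S required_skills candidates)

-- ===== LEMMAS AND PROOFS =====

-- the mathematical value both programs compute: for each distinct required skill,
-- the sum of the top (count in required_skills) entries of m's list for that skill
def pvPhi (m : PySem.Dict String (List Int)) (req : List String) : Int :=
  ∑ s ∈ req.toFinset, ((m.getD s []).take (req.count s)).sum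

lemma pvPhi_cons_nil (m : PySem.Dict String (List Int)) (s : String) (req : List String)
    (h : m.getD s [] = []) : pvPhi m (s :: req) = pvPhi m req := by
  unfold pvPhi
  rw [List.toFinset_cons]
  by_cases hs : s ∈ req.toFinset
  · rw [Finset.insert_eq_self.mpr hs]
    refine Finset.sum_congr rfl (fun u hu => ?_)
    by_cases hus : u = s
    · subst hus; simp [h]
    · simp [List.count_cons, Ne.symm hus]
  · rw [Finset.sum_insert hs]
    have h0 : ((m.getD s []).take ((s :: req).count s)).sum = 0 := by simp [h]
    rw [h0, zero_add]
    refine Finset.sum_congr rfl (fun u hu => ?_)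
    have hus : ¬ (s = u) := fun he => hs (he ▸ hu)
    simp [List.count_cons, hus]

lemma pvPhi_cons_cons (m : PySem.Dict String (List Int)) (s : String) (req : List String)
    (h0 : Int) (t : List Int) (h : m.getD s [] = h0 :: t) :
    pvPhi m (s :: req) = h0 + pvPhi (m.insert s t) req := by
  unfold pvPhi
  rw [List.toFinset_cons]
  by_cases hs : s ∈ req.toFinset
  · rw [Finset.insert_eq_self.mpr hs]
    rw [← Finset.add_sum_erase _ _ hs, ← Finset.add_sum_erase _ _ hs]
    have hterm : ((m.getD s []).take ((s :: req).count s)).sum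
        = h0 + (((m.insert s t).getD s []).take (req.count s)).sum := by
      rw [h, List.count_cons_self, List.take_succ_cons, PySem.Dict.getD_insert_self]
      simp
    rw [hterm, add_assoc]
    congr 1
    congr 1
    refine Finset.sum_congr rfl (fun u hu => ?_)
    have hus : u ≠ s := (Finset.mem_erase.mp hu).1
    rw [PySem.Dict.getD_insert_of_ne _ _ _ hus]
    simp [List.count_cons, hus, Ne.symm hus]
  · rw [Finset.sum_insert hs]
    have hcnt : req.count s = 0 := by
      simp [List.count_eq_zero]
      exact fun hc => hs (List.mem_toFinset.mpr hc)
    have hterm : ((m.getD s []).take ((s :: req).count s)).sum = h0 := by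
      rw [h, List.count_cons_self, hcnt, List.take_succ_cons]
      simp
    rw [hterm]
    congr 1
    refine Finset.sum_congr rfl (fun u hu => ?_)
    have hus : u ≠ s := fun he => hs (he ▸ hu)
    rw [PySem.Dict.getD_insert_of_ne _ _ _ hus]
    simp [List.count_cons, Ne.symm hus]

-- A's assignment loop computes acc + pvPhi of the current dict
lemma pvAloop (req : List String) (m : PySem.Dict String (List Int)) (acc : Int) :
    (req.foldl
      (fun (st : PySem.Dict String (List Int) × Int) sname =>
        match st.1.getD sname [] with
        | [] => st
        | h :: t => (st.1.insert sname t, st.2 + h))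
      (m, acc)).2 = acc + pvPhi m req := by
  induction req generalizing m acc with
  | nil => simp [pvPhi]
  | cons s req ih =>
    rw [List.foldl_cons]
    cases h : m.getD s [] with
    | nil =>
      simp only [h]
      rw [ih m acc, pvPhi_cons_nil m s req h]
    | cons h0 t =>
      simp only [h]
      rw [ih (m.insert s t) (acc + h0), pvPhi_cons_cons m s req h0 t h, add_assoc]

-- the sorting pass: getD after re-inserting sorted lists over a Nodup key list
lemma pvSortPass (K : List String) (d : PySem.Dict String (List Int)) (hK : K.Nodup) (s : String) :
    (K.foldl (fun d sk => d.insert sk (PySem.List.sorted (d.getD sk []) (fun x => x) true)) d).getD s []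
    = if s ∈ K then PySem.List.sorted (d.getD s []) (fun x => x) true else d.getD s [] := by
  induction K generalizing d with
  | nil => simp
  | cons k K ih =>
    rcases List.nodup_cons.mp hK with ⟨hk, hK'⟩
    rw [List.foldl_cons, ih _ hK']
    by_cases hs : s = k
    · subst hs
      simp [hk, PySem.Dict.getD_insert_self]
    · rw [PySem.Dict.getD_insert_of_ne _ _ _ hs]
      simp [List.mem_cons, hs]

-- getD for an absent key is []
lemma pvGetD_nil_of_not_mem_keys (d : PySem.Dict String (List Int)) (s : String)
    (h : s ∉ d.keys) : d.getD s [] = [] := by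
  have h2 : d.get? s = none := by
    rw [PySem.Dict.get?_eq_none_iff_not_mem_keys]
    exact h
  rw [PySem.Dict.getD_eq_get?_getD, h2]
  rfl

-- main equivalence, fully applied
lemma pvMain (N M S : Int) (req : List String) (candidates : List (Int × List (String × Int))) :
    calculate_max_global_score N M S req candidates
    = calculate_max_global_score_alt N M S req candidates := by
  unfold calculate_max_global_score calculate_max_global_score_alt
  simp only
  -- B's grouping fold over .values equals A's grouping fold over .items
  rw [show (PySem.Dict.ofList candidates).values
        = (PySem.Dict.ofList candidates).items.map (fun p => p.2) from rfl,
      List.foldl_map]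
  set stc0 : PySem.Dict String (List Int) :=
    (PySem.Dict.ofList candidates).items.foldl
      (fun d p => p.2.foldl (fun d2 q => d2.modify q.1 [] (fun l => l ++ [q.2])) d)
      PySem.Dict.empty with hstc0
  -- keys of the grouping dict are Nodup (view the nested fold as one fold over the flat list)
  have hflat : stc0 = ((PySem.Dict.ofList candidates).items.map (fun p => p.2)).flatten.foldl
      (fun d2 q => d2.modify q.1 [] (fun l => l ++ [q.2])) PySem.Dict.empty := by
    rw [hstc0, List.foldl_flatten, List.foldl_map]
  have hkeys : stc0.keys.Nodup := by
    rw [hflat]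
    exact PySem.Dict.nodup_keys_foldl_modify_key _ (fun q : String × Int => q.1) []
      (fun (_ : PySem.Dict String (List Int)) (q : String × Int) (l : List Int) => l ++ [q.2]) _
      PySem.Dict.nodup_keys_empty
  -- after the sorting pass, every lookup is the sorted list
  have hsorted : ∀ s,
      (stc0.keys.foldl
        (fun d sk => d.insert sk (PySem.List.sorted (d.getD sk []) (fun x => x) true)) stc0).getD s []
      = PySem.List.sorted (stc0.getD s []) (fun x => x) true := by
    intro s
    rw [pvSortPass _ _ hkeys s]
    by_cases hs : s ∈ stc0.keys
    · simp [hs]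
    · rw [if_neg hs, pvGetD_nil_of_not_mem_keys _ _ hs]
      rfl
  -- A's side
  rw [pvAloop, zero_add]
  -- B's side: the demand dict is Counter(req)
  rw [PySem.Dict.foldl_insert_getD_add_one_eq_counter, PySem.Dict.items_counter,
      List.foldl_map]
  have hfold : ∀ (L : List String) (init : Int),
      L.foldl (fun tot k =>
        tot + (PySem.List.slice (PySem.List.sorted (stc0.getD k []) (fun x => x) true)
                none (some ((req.count k : Nat) : Int))).sum) init
      = init + (L.map (fun k =>
          ((PySem.List.sorted (stc0.getD k []) (fun x => x) true).take (req.count k)).sum)).sum := by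
    intro L
    induction L with
    | nil => simp
    | cons k L ih =>
      intro init
      rw [List.foldl_cons, ih, List.map_cons, List.sum_cons,
          PySem.List.slice_to_natCast]
      ring
  rw [hfold, zero_add]
  -- both sides are the same Finset sum
  have hset : (PySem.Set.ofList req).toFinset = req.toFinset := by
    ext x
    simp [List.mem_toFinset, PySem.Set.mem_ofList]
  rw [← List.sum_toFinset _ (PySem.Set.nodup_ofList req), hset]
  unfold pvPhi
  refine Finset.sum_congr rfl (fun u hu => ?_)
  rw [hsorted u]

-- ===== VERDICT (by name: the statement is the Claim_ definition above) =====
theorem calculate_max_global_score_spec : Claim_equal_calculate_max_global_score := by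
  intro N M S req candidates _
  unfold Spec_calculate_max_global_score
  exact pvMain N M S req candidates
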